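-- pv_equiv track=rewrite | github.com/securesystemslab/zippy | graal/edu.uci.python.benchmark/src/micro/special-len.py | docompute
-- ===== SOURCE A (Python) =====
-- class Num:
-- 	def __init__(self, n):
-- 		self.n = n
-- 	def __len__(self):
-- 		return self.n
-- 	def __repr__(self):
-- 		return repr(self.n)
--
-- def docompute(num):
-- 	for i in range(num):
-- 		sum = 0
-- 		one = Num(42)
-- 		j = 0
-- 		while j < num:
-- 			sum = sum + len(one)
-- 			j += 1
--
-- 	return sum
-- ===== SOURCE B (Python) =====
-- def docompute(num):
--     return 42 * num
-- ===== Notes on version B (the rewrite author's own statement) =====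
-- stated objective: faster
-- what changed: Replaced the O(num^2) nested loops summing len(Num(42)) with the closed form 42*num.
-- outside the precondition, e.g. on docompute(0): A raises UnboundLocalError, B returns 0
import Mathlib
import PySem

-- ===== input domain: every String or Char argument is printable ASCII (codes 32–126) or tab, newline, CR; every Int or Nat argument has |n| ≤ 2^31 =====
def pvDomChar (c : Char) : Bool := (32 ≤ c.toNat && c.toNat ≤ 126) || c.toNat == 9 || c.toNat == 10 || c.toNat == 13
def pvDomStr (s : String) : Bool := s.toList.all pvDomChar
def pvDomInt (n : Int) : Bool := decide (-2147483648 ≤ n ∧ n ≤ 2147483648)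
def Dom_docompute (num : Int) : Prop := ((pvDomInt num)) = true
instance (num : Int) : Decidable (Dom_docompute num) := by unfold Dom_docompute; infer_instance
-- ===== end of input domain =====

-- B replaces the O(num^2) nested loops with the closed form 42*num (asymptotically faster).

-- ===== PORT A =====
-- inner 'while j < num: sum = sum + len(one); j += 1' (len(one) = 42)
def docomputeWhile (num sum j : Int) : Int :=
  if h : j < num then docomputeWhile num (sum + 42) (j + 1) else sum
  termination_by (num - j).toNat
  decreasing_by omega

-- 'for i in range(num): sum = 0; …inner while…'; returns the last loop body's sum
-- (for num ≤ 0 the loop never runs and Python raises UnboundLocalError; excluded by Pre_)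
def docompute (num : Int) : Int :=
  (PySem.List.pyRange 0 num 1).foldl (fun _ _ => docomputeWhile num 0 0) 0

-- ===== PORT B =====
def docompute_alt (num : Int) : Int := 42 * num

-- ===== PRECONDITION & SPEC =====
-- Pre_ excludes num ≤ 0, where A's for-loop body never runs and 'return sum' raises UnboundLocalError.
def Pre_docompute (num : Int) : Prop := 1 ≤ num
instance (num : Int) : Decidable (Pre_docompute num) := by unfold Pre_docompute; infer_instance
def pvWitness_docompute : Int := 3

def Spec_docompute (num : Int) (out : Int) : Prop := out = docompute_alt num
instance (num : Int) (out : Int) : Decidable (Spec_docompute num out) := by unfold Spec_docompute; infer_instance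

-- ===== CLAIM =====
def Claim_equal_docompute : Prop := ∀ (num : Int), Dom_docompute num → Pre_docompute num → Spec_docompute num (docompute num)

-- ===== LEMMAS AND PROOFS =====
theorem docomputeWhile_eq (num : Int) (j sum : Int) (hj : j ≤ num) :
    docomputeWhile num sum j = sum + 42 * (num - j) := by
  induction hfuel : (num - j).toNat generalizing j sum with
  | zero =>
    rw [docomputeWhile, dif_neg (by omega)]
    have : num - j = 0 := by omega
    rw [this]; ring
  | succ k ih =>
    rw [docomputeWhile, dif_pos (by omega)]
    rw [ih (j + 1) (sum + 42) (by omega) (by omega)]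
    ring

theorem foldl_const_ne_nil {α β : Type} (c : β) (init : β) :
    ∀ (l : List α), l ≠ [] → l.foldl (fun _ _ => c) init = c := by
  intro l
  induction l generalizing init with
  | nil => intro h; exact absurd rfl h
  | cons x xs ih =>
    intro _
    cases xs with
    | nil => rfl
    | cons y ys => exact ih c (by simp)

-- ===== VERDICT =====
theorem docompute_spec : Claim_equal_docompute := by
  intro num _ hpre
  unfold Pre_docompute at hpre
  unfold Spec_docompute docompute docompute_alt
  have hne : PySem.List.pyRange 0 num 1 ≠ [] := by
    have : (0 : Int) ∈ PySem.List.pyRange 0 num 1 := by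
      rw [PySem.List.mem_pyRange_one]; omega
    intro h; rw [h] at this; simp at this
  rw [foldl_const_ne_nil _ _ _ hne, docomputeWhile_eq num 0 0 (by omega)]
  ring
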